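-- pv_equiv track=rewrite | github.com/Silewis37/JARVIS-MySQL-Plugin | jarvisMySQLplugin/main_init.py | _quote_env_value
-- ===== SOURCE A (Python) =====
-- def _quote_env_value(value: str) -> str:
--     """Quote value if it contains spaces or special chars.
--     Escapes backslashes and double quotes inside quoted strings.
--     """
--     if value is None:
--         return ""
--     needs_quotes = any(ch in value for ch in [' ', '\t', '#', '"', "'", '=', '\\'])
--     if needs_quotes:
--         escaped = value.replace('\\', r'\\').replace('"', r'\"')
--         return f'"{escaped}"'
--     return value
-- ===== SOURCE B (Python) =====
-- def _quote_env_value(value: str) -> str: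
--     if value is None:
--         return ""
--     parts = []
--     needs_quotes = False
--     for ch in value:
--         if ch in ' \t#"\'=\\':
--             needs_quotes = True
--         if ch == '\\':
--             parts.append('\\\\')
--         elif ch == '"':
--             parts.append('\\"')
--         else:
--             parts.append(ch)
--     if needs_quotes:
--         return '"' + ''.join(parts) + '"'
--     return value
-- ===== Notes on version B (the rewrite author's own statement) =====
-- stated objective: alternative
-- what changed: One single pass over the characters that simultaneously detects the special characters and builds the escaped text, instead of a membership scan per special char plus two full .replace passes.
import Mathlib
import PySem

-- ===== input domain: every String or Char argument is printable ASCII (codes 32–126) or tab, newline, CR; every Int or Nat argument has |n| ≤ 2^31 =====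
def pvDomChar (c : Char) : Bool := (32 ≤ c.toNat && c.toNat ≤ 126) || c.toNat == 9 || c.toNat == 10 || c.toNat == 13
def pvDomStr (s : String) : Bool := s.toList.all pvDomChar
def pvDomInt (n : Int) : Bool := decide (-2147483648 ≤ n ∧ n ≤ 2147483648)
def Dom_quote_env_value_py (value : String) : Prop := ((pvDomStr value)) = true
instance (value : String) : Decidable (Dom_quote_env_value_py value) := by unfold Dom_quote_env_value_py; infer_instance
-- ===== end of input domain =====

-- B replaces A's per-special-char membership scans plus two .replace passes with one
-- single loop that both sets the needs_quotes flag and builds the escaped characters.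
-- (The Python 'value is None' guard is unreachable for a String argument and is not ported.)

-- ===== PORT A =====
def quote_env_value_py (value : String) : String :=
  let needs_quotes :=
    ([" ", "\t", "#", "\"", "'", "=", "\\"] : List String).any
      (fun ch => PySem.Str.isIn ch value)
  if needs_quotes then
    let escaped := PySem.Str.replace (PySem.Str.replace value "\\" "\\\\") "\"" "\\\""
    "\"" ++ escaped ++ "\""
  else value

-- ===== PORT B =====
def quote_env_value_py_alt (value : String) : String :=
  let st := value.toList.foldl
    (fun (st : List Char × Bool) ch =>
      let needs := st.2 || decide (ch ∈ ([' ', '\t', '#', '"', '\'', '=', '\\'] : List Char))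
      let parts := st.1 ++ (if ch = '\\' then ['\\', '\\']
                            else if ch = '"' then ['\\', '"']
                            else [ch])
      (parts, needs))
    ([], false)
  if st.2 then String.ofList ('"' :: st.1 ++ ['"']) else value

-- ===== PRECONDITION & SPEC =====
def Spec_quote_env_value_py (value : String) (out : String) : Prop := out = quote_env_value_py_alt value
instance (value : String) (out : String) : Decidable (Spec_quote_env_value_py value out) := by unfold Spec_quote_env_value_py; infer_instance

-- ===== CLAIM (what is proved, stated in full; the proofs are below) =====
def Claim_equal_quote_env_value_py : Prop := ∀ (value : String), Dom_quote_env_value_py value → Spec_quote_env_value_py value (quote_env_value_py value)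

-- ===== LEMMAS AND PROOFS =====

def pvEsc (c : Char) : List Char :=
  if c = '\\' then ['\\', '\\'] else if c = '"' then ['\\', '"'] else [c]

def pvSpecial (c : Char) : Bool :=
  decide (c ∈ ([' ', '\t', '#', '"', '\'', '=', '\\'] : List Char))

lemma singleton_infix_iff (c : Char) (l : List Char) : [c] <:+: l ↔ c ∈ l := by
  constructor
  · intro h; exact h.subset (by simp)
  · intro h
    obtain ⟨s, t, rfl⟩ := List.append_of_mem h
    exact ⟨s, t, by simp⟩

lemma replace_go_single (c0 : Char) (new : List Char) :
    ∀ (fuel : Nat) (l acc : List Char), l.length ≤ fuel →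
      PySem.Chars.replace.go [c0] new fuel l acc =
        acc.reverse ++ l.flatMap (fun c => if c = c0 then new else [c]) := by
  intro fuel
  induction fuel with
  | zero => intro l acc h; simp at h; subst h; simp [PySem.Chars.replace.go]
  | succ n ih =>
    intro l acc h
    cases l with
    | nil => simp [PySem.Chars.replace.go]
    | cons c t =>
      simp only [PySem.Chars.replace.go]
      by_cases hc : c = c0
      · subst hc
        have hp : List.isPrefixOf [c] (c :: t) = true := by simp [List.isPrefixOf]
        rw [if_pos hp]
        simp only [List.length, List.drop_succ_cons, List.drop_zero]
        rw [ih t _ (by simpa using Nat.le_of_succ_le_succ h)]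
        simp
      · have hp : List.isPrefixOf [c0] (c :: t) = false := by
          simp only [List.isPrefixOf, Bool.and_eq_false_iff]
          left
          simp [Ne.symm hc]
        rw [if_neg (by simp [hp])]
        rw [ih t _ (by simpa using Nat.le_of_succ_le_succ h)]
        simp [hc]

lemma replace_single (s : List Char) (c0 : Char) (new : List Char) :
    PySem.Chars.replace s [c0] new = s.flatMap (fun c => if c = c0 then new else [c]) := by
  rw [PySem.Chars.replace]
  rw [if_neg (by simp)]
  simpa using replace_go_single c0 new s.length s [] le_rfl

lemma escaped_eq (s : List Char) :
    PySem.Chars.replace (PySem.Chars.replace s ['\\'] ['\\', '\\']) ['"'] ['\\', '"'] =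
      s.flatMap pvEsc := by
  rw [replace_single, replace_single, List.flatMap_assoc]
  apply List.flatMap_congr
  intro c _
  by_cases h1 : c = '\\'
  · subst h1; simp [pvEsc]
  · by_cases h2 : c = '"'
    · subst h2; simp [pvEsc]
    · simp [pvEsc, h1, h2]

lemma foldl_spec (l : List Char) : ∀ (acc : List Char) (b : Bool),
    l.foldl
      (fun (st : List Char × Bool) ch =>
        (st.1 ++ (if ch = '\\' then ['\\', '\\'] else if ch = '"' then ['\\', '"'] else [ch]),
         st.2 || decide (ch ∈ ([' ', '\t', '#', '"', '\'', '=', '\\'] : List Char))))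
      (acc, b)
    = (acc ++ l.flatMap pvEsc, b || l.any pvSpecial) := by
  induction l with
  | nil => intro acc b; simp
  | cons c t ih =>
    intro acc b
    simp only [List.foldl_cons, List.flatMap_cons, List.any_cons]
    rw [ih]
    simp [pvEsc, pvSpecial, Bool.or_assoc]

lemma needs_eq (value : String) :
    (([" ", "\t", "#", "\"", "'", "=", "\\"] : List String).any
      (fun ch => PySem.Str.isIn ch value))
    = value.toList.any pvSpecial := by
  rw [Bool.eq_iff_iff]
  simp only [List.any_cons, List.any_nil, Bool.or_eq_true, Bool.or_false,
    PySem.Str.isIn_iff_infix, List.any_eq_true, pvSpecial, decide_eq_true_eq]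
  rw [show (" " : String).toList = [' '] from by decide,
      show ("\t" : String).toList = ['\t'] from by decide,
      show ("#" : String).toList = ['#'] from by decide,
      show ("\"" : String).toList = ['"'] from by decide,
      show ("'" : String).toList = ['\''] from by decide,
      show ("=" : String).toList = ['='] from by decide,
      show ("\\" : String).toList = ['\\'] from by decide]
  simp only [singleton_infix_iff, List.mem_cons, List.not_mem_nil, or_false]
  constructor
  · rintro (h | h | h | h | h | h | h) <;> exact ⟨_, h, by simp⟩
  · rintro ⟨c, hc, hmem⟩
    rcases hmem with rfl | rfl | rfl | rfl | rfl | rfl | rfl <;> tauto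

-- ===== VERDICT (by name: the statement is the Claim_ definition above) =====
theorem quote_env_value_py_spec : Claim_equal_quote_env_value_py := by
  intro value _
  unfold Spec_quote_env_value_py quote_env_value_py quote_env_value_py_alt
  rw [foldl_spec value.toList [] false, needs_eq]
  simp only [List.nil_append, Bool.false_or]
  rcases h : value.toList.any pvSpecial with _ | _
  · simp
  · rw [if_pos rfl]
    apply String.ext
    simp [PySem.Str.toList_replace, escaped_eq,
      show ("\\" : String).toList = ['\\'] from by decide,
      show ("\\\\" : String).toList = ['\\','\\'] from by decide,
      show ("\"" : String).toList = ['"'] from by decide,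
      show ("\\\"" : String).toList = ['\\','"'] from by decide]
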